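-- pv_equiv track=rewrite | github.com/doreshnikov/botts | botts/testsys/config/tasks/filter_list_by_list/solution.py | filter_list_by_list
-- ===== SOURCE A (Python) =====
-- def filter_list_by_list(lst_a: list[int] | range, lst_b: list[int] | range) -> list[int]:
--     """
--     Filter first sorted list by other sorted list
--     :param lst_a: first sorted list
--     :param lst_b: second sorted list
--     :return: filtered sorted list
--     """
--     result = []
--     i, j = 0, 0
--
--     while i < len(lst_a) and j < len(lst_b):
--         if lst_a[i] < lst_b[j]:
--             result.append(lst_a[i])
--             i += 1
--         elif lst_a[i] > lst_b[j]:
--             j += 1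
--         else:
--             i += 1
--
--     result.extend(lst_a[i:])
--
--     return result
-- ===== SOURCE B (Python) =====
-- def filter_list_by_list(lst_a, lst_b):
--     """
--     Filter first sorted list by other sorted list
--     """
--     result = []
--     i = 0
--     for y in lst_b:
--         k = i
--         while k < len(lst_a) and lst_a[k] <= y:
--             k += 1
--         result += [x for x in lst_a[i:k] if x != y]
--         i = k
--     return result + lst_a[i:]
-- ===== Notes on version B (the rewrite author's own statement) =====
-- stated objective: alternative
-- what changed: Inverts the loop structure: instead of A's two-index while loop with a three-way comparison branch and a tail extend, B iterates over lst_b as the outer loop, per element slicing off the prefix chunk of the remaining lst_a that is <= it and keeping the non-equal elements with a comprehension.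
import Mathlib
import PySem

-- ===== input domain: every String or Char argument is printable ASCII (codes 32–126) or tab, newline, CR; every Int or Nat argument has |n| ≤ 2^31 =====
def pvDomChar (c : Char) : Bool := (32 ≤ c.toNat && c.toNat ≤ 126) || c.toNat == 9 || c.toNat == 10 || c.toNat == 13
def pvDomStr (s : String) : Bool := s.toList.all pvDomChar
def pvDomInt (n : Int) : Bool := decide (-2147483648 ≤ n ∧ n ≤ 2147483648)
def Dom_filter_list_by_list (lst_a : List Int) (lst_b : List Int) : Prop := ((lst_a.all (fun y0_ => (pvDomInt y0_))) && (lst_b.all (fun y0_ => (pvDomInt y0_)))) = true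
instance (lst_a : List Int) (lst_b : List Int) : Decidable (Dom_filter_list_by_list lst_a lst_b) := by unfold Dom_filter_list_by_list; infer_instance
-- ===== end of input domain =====

-- B inverts the loop structure: outer loop over lst_b, per element slicing off the prefix
-- chunk of the remaining lst_a (alternative decomposition; equal return value everywhere).


-- ===== PORT A =====
-- the while loop: state (i, j, result); 'result.extend(lst_a[i:])' on exit (i : Nat, so lst_a[i:] = List.drop i)
def pvA_loop (lst_a : List Int) (lst_b : List Int) (i j : Nat) (result : List Int) : List Int :=
  if h : i < lst_a.length ∧ j < lst_b.length then
    if lst_a[i]'h.1 < lst_b[j]'h.2 then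
      pvA_loop lst_a lst_b (i + 1) j (result ++ [lst_a[i]'h.1])
    else if lst_a[i]'h.1 > lst_b[j]'h.2 then
      pvA_loop lst_a lst_b i (j + 1) result
    else
      pvA_loop lst_a lst_b (i + 1) j result
  else
    result ++ lst_a.drop i
termination_by (lst_a.length - i) + (lst_b.length - j)
decreasing_by all_goals omega

def filter_list_by_list (lst_a : List Int) (lst_b : List Int) : List Int :=
  pvA_loop lst_a lst_b 0 0 []

-- ===== PORT B =====
-- the inner 'k = i; while k < len(lst_a) and lst_a[k] <= y: k += 1'
def pvB_span (lst_a : List Int) (y : Int) (k : Nat) : Nat :=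
  if h : k < lst_a.length then
    if lst_a[k]'h ≤ y then pvB_span lst_a y (k + 1) else k
  else k
termination_by lst_a.length - k
decreasing_by omega

-- one iteration of B's 'for y in lst_b' on the state (result, i)
def pvB_step (lst_a : List Int) (st : List Int × Nat) (y : Int) : List Int × Nat :=
  let k := pvB_span lst_a y st.2
  (st.1 ++ (PySem.List.slice lst_a (some (st.2 : Int)) (some (k : Int))).filter
      (fun x => decide (x ≠ y)), k)

def filter_list_by_list_alt (lst_a : List Int) (lst_b : List Int) : List Int :=
  let st := lst_b.foldl (pvB_step lst_a) ([], 0)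
  st.1 ++ PySem.List.slice lst_a (some (st.2 : Int)) none

-- ===== PRECONDITION & SPEC =====
def Spec_filter_list_by_list (lst_a : List Int) (lst_b : List Int) (out : List Int) : Prop := out = filter_list_by_list_alt lst_a lst_b
instance (lst_a : List Int) (lst_b : List Int) (out : List Int) : Decidable (Spec_filter_list_by_list lst_a lst_b out) := by unfold Spec_filter_list_by_list; infer_instance

-- ===== CLAIM (what is proved, stated in full; the proofs are below) =====
def Claim_equal_filter_list_by_list : Prop := ∀ (lst_a : List Int) (lst_b : List Int), Dom_filter_list_by_list lst_a lst_b → Spec_filter_list_by_list lst_a lst_b (filter_list_by_list lst_a lst_b)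

-- ===== LEMMAS AND PROOFS =====

theorem pvB_span_ge (lst_a : List Int) (y : Int) (k : Nat) : k ≤ pvB_span lst_a y k := by
  fun_induction pvB_span lst_a y k with
  | case1 k h hle ih => omega
  | case2 k h hle => exact le_refl k
  | case3 k h => exact le_refl k

theorem pvB_step_consume (lst_a res : List Int) (i : Nat) (y : Int)
    (h : i < lst_a.length) (hle : lst_a[i] ≤ y) :
    pvB_step lst_a (res, i) y
      = pvB_step lst_a (res ++ (if lst_a[i] = y then [] else [lst_a[i]]), i + 1) y := by
  unfold pvB_step
  have hk : pvB_span lst_a y i = pvB_span lst_a y (i + 1) := by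
    rw [pvB_span.eq_def, dif_pos h, if_pos hle]
  have hge : i + 1 ≤ pvB_span lst_a y (i + 1) := pvB_span_ge lst_a y (i + 1)
  simp only [hk]
  set k := pvB_span lst_a y (i + 1) with hkdef
  have hslice : PySem.List.slice lst_a (some (i : Int)) (some (k : Int))
      = lst_a[i] :: PySem.List.slice lst_a (some ((i + 1 : Nat) : Int)) (some (k : Int)) := by
    rw [PySem.List.slice_natCast, PySem.List.slice_natCast, List.drop_eq_getElem_cons h]
    rw [show k - i = (k - (i + 1)) + 1 by omega, List.take_succ_cons]
  simp only [hslice, List.filter_cons]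
  by_cases hxy : lst_a[i] = y <;> simp [hxy]

theorem pvB_step_skip (lst_a res : List Int) (i : Nat) (y : Int)
    (hstop : pvB_span lst_a y i = i) :
    pvB_step lst_a (res, i) y = (res, i) := by
  unfold pvB_step
  simp [hstop, PySem.List.slice_natCast]

theorem pvB_foldl_end (lst_a ys res : List Int) (i : Nat) (hi : lst_a.length ≤ i) :
    ys.foldl (pvB_step lst_a) (res, i) = (res, i) := by
  induction ys with
  | nil => rfl
  | cons y ys ih =>
    rw [List.foldl_cons, pvB_step_skip lst_a res i y (by rw [pvB_span.eq_def, dif_neg (by omega)])]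
    exact ih

-- A's loop state (i, j, result) corresponds to B's fold over the remaining lst_b
-- with state (result, i).
theorem pvA_loop_eq_foldl (lst_a lst_b : List Int) (i j : Nat) (result : List Int) :
    pvA_loop lst_a lst_b i j result
      = (let st := (lst_b.drop j).foldl (pvB_step lst_a) (result, i)
         st.1 ++ PySem.List.slice lst_a (some (st.2 : Int)) none) := by
  fun_induction pvA_loop lst_a lst_b i j result with
  | case1 i j result h hlt ih =>
    rw [ih]
    simp only [List.drop_eq_getElem_cons h.2, List.foldl_cons,
      pvB_step_consume lst_a result i lst_b[j] h.1 (le_of_lt hlt)]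
    rw [if_neg (show ¬ lst_a[i]'h.1 = lst_b[j]'h.2 by omega)]
  | case2 i j result h hlt hgt ih =>
    rw [ih]
    rw [List.drop_eq_getElem_cons h.2, List.foldl_cons,
      pvB_step_skip lst_a result i lst_b[j]
        (by rw [pvB_span.eq_def, dif_pos h.1, if_neg (by omega)])]
  | case3 i j result h hlt hgt ih =>
    rw [ih]
    simp only [List.drop_eq_getElem_cons h.2, List.foldl_cons,
      pvB_step_consume lst_a result i lst_b[j] h.1 (by omega)]
    rw [if_pos (show lst_a[i]'h.1 = lst_b[j]'h.2 by omega)]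
    simp
  | case4 i j result h =>
    rcases Nat.lt_or_ge i lst_a.length with hi | hi
    · have hj : lst_b.length ≤ j := by omega
      rw [List.drop_eq_nil_of_le hj]
      simp [PySem.List.slice_from_natCast]
    · rw [pvB_foldl_end lst_a _ result i hi]
      simp [PySem.List.slice_from_natCast]

-- ===== VERDICT (by name: the statement is the Claim_ definition above) =====
theorem filter_list_by_list_spec : Claim_equal_filter_list_by_list := by
  intro lst_a lst_b _
  unfold Spec_filter_list_by_list filter_list_by_list filter_list_by_list_alt
  rw [pvA_loop_eq_foldl]
  simp
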